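-- pv_equiv track=rewrite | github.com/Travor278/MINT-SJTU | mint_sjtu/Evo-1_reproduction/code/Evo_1/scripts/level2_batch_attention_probe.py | select_cases
-- ===== SOURCE A (Python) =====
-- from collections import defaultdict
--
-- def select_cases(cases, max_per_status):
--     grouped = defaultdict(list)
--     for case in cases:
--         grouped[(case["suite"], case["status"])].append(case)
--
--     selected = []
--     suites = sorted({case["suite"] for case in cases})
--     for suite in suites:
--         for status in ("success", "fail"):
--             selected.extend(grouped[(suite, status)][:max_per_status])
--     return selected
-- ===== SOURCE B (Python) =====
-- def select_cases(cases, max_per_status):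
--     # Selection-by-minimum: repeatedly take the smallest remaining suite,
--     # emit its success/fail slices, drop that suite's cases, repeat.
--     # No grouping dict, no set, no sort.
--     selected = []
--     remaining = list(cases)
--     while remaining:
--         suite = min(c["suite"] for c in remaining)
--         succ = [c for c in remaining if c["suite"] == suite and c["status"] == "success"]
--         fail = [c for c in remaining if c["suite"] == suite and c["status"] == "fail"]
--         selected += succ[:max_per_status] + fail[:max_per_status]
--         remaining = [c for c in remaining if c["suite"] != suite]
--     return selected
-- ===== Notes on version B (the rewrite author's own statement) =====
-- stated objective: alternative
-- what changed: Replaces A's build-a-defaultdict-index-plus-sorted-suite-set pass with a selection-by-minimum loop: repeatedly find the smallest remaining suite, emit its success/fail slices by filtering the remaining list, and drop that suite's cases; no dict, no set, no sort.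
import Mathlib
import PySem

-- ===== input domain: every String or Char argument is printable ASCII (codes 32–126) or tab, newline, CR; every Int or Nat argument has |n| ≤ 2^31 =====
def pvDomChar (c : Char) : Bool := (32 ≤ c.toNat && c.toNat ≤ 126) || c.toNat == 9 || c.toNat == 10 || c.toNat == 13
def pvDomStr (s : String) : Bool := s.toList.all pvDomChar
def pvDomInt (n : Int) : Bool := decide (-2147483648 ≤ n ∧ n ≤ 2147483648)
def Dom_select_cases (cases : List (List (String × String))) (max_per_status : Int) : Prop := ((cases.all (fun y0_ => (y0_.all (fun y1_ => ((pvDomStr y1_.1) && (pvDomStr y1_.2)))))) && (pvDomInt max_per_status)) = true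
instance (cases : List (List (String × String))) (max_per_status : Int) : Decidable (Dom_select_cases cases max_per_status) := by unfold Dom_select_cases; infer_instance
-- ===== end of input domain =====

-- B replaces A's defaultdict-index + sorted-suite-set pass with a selection-by-minimum loop
-- (repeatedly emit the smallest remaining suite's success/fail slices, then drop that suite);
-- same return value, no speed claim.

-- case[k]: exact where the key is present (Pre_ guarantees that); Python raises KeyError otherwise.
def pvGet (c : List (String × String)) (k : String) : String := (PySem.Dict.get? (PySem.Dict.mk c) k).getD ""

-- ===== PORT A =====
def select_cases (cases : List (List (String × String))) (max_per_status : Int) : List (List (String × String)) :=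
  let grouped := cases.foldl
    (fun d c => PySem.Dict.modify d (pvGet c "suite", pvGet c "status") [] (fun l => l ++ [c]))
    PySem.Dict.empty
  let suites := PySem.List.sorted (PySem.Set.ofList (cases.map (fun c => pvGet c "suite"))) (fun x => x) false
  suites.foldl (fun sel suite =>
    (["success", "fail"]).foldl (fun sel2 status =>
      sel2 ++ PySem.List.slice (PySem.Dict.getD grouped (suite, status) []) none (some max_per_status)) sel) []

-- ===== PORT B =====
-- termination helper, cited by the port's decreasing_by: dropping the minimal suite removes at least one case
theorem pvRestShorter (r : List (String × String)) (rs : List (List (String × String))) :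
    ((r :: rs).filter (fun c =>
        pvGet c "suite" != (PySem.List.min? ((r :: rs).map (fun c => pvGet c "suite")) (fun x => x)).getD "")).length
      < (r :: rs).length := by
  rcases hm : PySem.List.min? ((r :: rs).map (fun c => pvGet c "suite")) (fun x => x) with _ | m
  · exact absurd ((PySem.List.min?_eq_none_iff _ _).mp hm) (by simp)
  · have hmem := PySem.List.min?_mem hm
    rcases List.mem_map.mp hmem with ⟨c, hc, hfc⟩
    refine List.length_filter_lt_length_iff_exists.mpr ⟨c, hc, ?_⟩
    simp [hfc]

-- the while loop of Source B: accumulator `selected`, shrinking `remaining`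
def selectLoop (max_per_status : Int) (selected : List (List (String × String)))
    (remaining : List (List (String × String))) : List (List (String × String)) :=
  match remaining with
  | [] => selected
  | r :: rs =>
    let suite := (PySem.List.min? ((r :: rs).map (fun c => pvGet c "suite")) (fun x => x)).getD ""
    let succ := (r :: rs).filter (fun c => pvGet c "suite" == suite && pvGet c "status" == "success")
    let fl := (r :: rs).filter (fun c => pvGet c "suite" == suite && pvGet c "status" == "fail")
    selectLoop max_per_status
      (selected ++ (PySem.List.slice succ none (some max_per_status)
                    ++ PySem.List.slice fl none (some max_per_status)))
      ((r :: rs).filter (fun c => pvGet c "suite" != suite))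
termination_by remaining.length
decreasing_by exact pvRestShorter r rs

def select_cases_alt (cases : List (List (String × String))) (max_per_status : Int) : List (List (String × String)) :=
  selectLoop max_per_status [] cases

-- ===== PRECONDITION & SPEC =====
-- Pre_: every case dict has the keys "suite" and "status"; otherwise the Python A raises KeyError.
def Pre_select_cases (cases : List (List (String × String))) (max_per_status : Int) : Prop :=
  (cases.all (fun c => PySem.Dict.contains (PySem.Dict.mk c) "suite" && PySem.Dict.contains (PySem.Dict.mk c) "status")) = true
instance (cases : List (List (String × String))) (max_per_status : Int) : Decidable (Pre_select_cases cases max_per_status) := by unfold Pre_select_cases; infer_instance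
def pvWitness_select_cases : (List (List (String × String))) × Int :=
  ([[("suite", "a"), ("status", "success")], [("suite", "a"), ("status", "fail")]], 1)

def Spec_select_cases (cases : List (List (String × String))) (max_per_status : Int) (out : List (List (String × String))) : Prop := out = select_cases_alt cases max_per_status
instance (cases : List (List (String × String))) (max_per_status : Int) (out : List (List (String × String))) : Decidable (Spec_select_cases cases max_per_status out) := by unfold Spec_select_cases; infer_instance

-- ===== CLAIM (what is proved, stated in full; the proofs are below) =====
def Claim_equal_select_cases : Prop := ∀ (cases : List (List (String × String))) (max_per_status : Int), Dom_select_cases cases max_per_status → Pre_select_cases cases max_per_status → Spec_select_cases cases max_per_status (select_cases cases max_per_status)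

-- ===== LEMMAS AND PROOFS =====

-- the common canonical form: for each suite in sorted order, the success slice then the fail slice
def pvPick (m : Int) (l : List (List (String × String))) (su : String) : List (List (String × String)) :=
  PySem.List.slice (l.filter (fun c => pvGet c "suite" == su && pvGet c "status" == "success")) none (some m)
    ++ PySem.List.slice (l.filter (fun c => pvGet c "suite" == su && pvGet c "status" == "fail")) none (some m)

def pvCanon (m : Int) (l : List (List (String × String))) : List (List (String × String)) :=
  (PySem.List.sorted (PySem.Set.ofList (l.map (fun c => pvGet c "suite"))) (fun x => x) false).flatMap (pvPick m l)

-- Reading A's grouping dict at (s, st) is exactly the filtered scan of `cases`.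
theorem grouped_getD (cases : List (List (String × String))) (s st : String) :
    PySem.Dict.getD
      (cases.foldl
        (fun d c => PySem.Dict.modify d (pvGet c "suite", pvGet c "status") [] (fun l => l ++ [c]))
        PySem.Dict.empty) (s, st) []
    = cases.filter (fun c => pvGet c "suite" == s && pvGet c "status" == st) := by
  have h := PySem.Dict.getD_foldl_modify_append
    (l := cases.map (fun c => ((pvGet c "suite", pvGet c "status"), c)))
    (d := PySem.Dict.empty) (c := (s, st))
  rw [List.foldl_map] at h
  rw [h, List.filter_map, List.map_map]
  simp only [PySem.Dict.getD_empty, List.nil_append]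
  have h2 : ((fun (x : (String × String) × List (String × String)) => x.2) ∘
      fun c => ((pvGet c "suite", pvGet c "status"), c)) = fun c => c := rfl
  rw [h2, List.map_id']
  exact List.filter_congr (fun c _ => rfl)

-- A computes the canonical form.
theorem a_eq_canon (cases : List (List (String × String))) (m : Int) :
    select_cases cases m = pvCanon m cases := by
  simp only [select_cases, pvCanon, grouped_getD, List.foldl_cons, List.foldl_nil,
    List.append_assoc]
  rw [PySem.List.foldl_append_eq_flatMap
    (g := fun su => PySem.List.slice (cases.filter (fun c => pvGet c "suite" == su && pvGet c "status" == "success")) none (some m)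
      ++ PySem.List.slice (cases.filter (fun c => pvGet c "suite" == su && pvGet c "status" == "fail")) none (some m))]
  simp only [List.nil_append]
  rfl

-- the sorted distinct suites of a nonempty list = minimal suite :: sorted distinct suites after dropping it
theorem sorted_suites_cons (r : List (String × String)) (rs : List (List (String × String)))
    (msu : String)
    (hm : PySem.List.min? ((r :: rs).map (fun c => pvGet c "suite")) (fun x => x) = some msu) :
    PySem.List.sorted (PySem.Set.ofList ((r :: rs).map (fun c => pvGet c "suite"))) (fun x => x) false
      = msu :: PySem.List.sorted
          (PySem.Set.ofList (((r :: rs).filter (fun c => pvGet c "suite" != msu)).map (fun c => pvGet c "suite")))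
          (fun x => x) false := by
  apply PySem.List.sorted_eq_of_perm_of_pairwise_lt
  · -- permutation with the full distinct-suite set
    have hnodup : (msu :: PySem.List.sorted
        (PySem.Set.ofList (((r :: rs).filter (fun c => pvGet c "suite" != msu)).map (fun c => pvGet c "suite")))
        (fun x => x) false).Nodup := by
      refine List.nodup_cons.mpr ⟨?_, ?_⟩
      · intro hmem
        have := (PySem.List.mem_sorted _ _ _ _).mp hmem
        have := (PySem.Set.mem_ofList _ _).mp this
        rcases List.mem_map.mp this with ⟨c, hc, hfc⟩
        have := (List.mem_filter.mp hc).2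
        simp [hfc] at this
      · exact ((PySem.List.sorted_perm _ _ _).nodup_iff).mpr (PySem.Set.nodup_ofList _)
    have hnodup2 : (PySem.Set.ofList ((r :: rs).map (fun c => pvGet c "suite"))).Nodup :=
      PySem.Set.nodup_ofList _
    apply (List.perm_ext_iff_of_nodup hnodup hnodup2).mpr
    intro a
    simp only [List.mem_cons, PySem.List.mem_sorted, PySem.Set.mem_ofList, List.mem_map]
    constructor
    · rintro (rfl | ⟨c, hc, hfc⟩)
      · rcases List.mem_map.mp (PySem.List.min?_mem hm) with ⟨c, hc, hfc⟩
        exact ⟨c, List.mem_cons.mp hc, hfc⟩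
      · exact ⟨c, List.mem_cons.mp (List.mem_filter.mp hc).1, hfc⟩
    · rintro ⟨c, hc, hfc⟩
      by_cases h : pvGet c "suite" = msu
      · exact Or.inl (hfc ▸ h)
      · exact Or.inr ⟨c, List.mem_filter.mpr ⟨List.mem_cons.mpr hc, by simp [h]⟩, hfc⟩
  · -- strictly increasing
    apply List.Pairwise.cons
    · intro a ha
      have ha' := (PySem.Set.mem_ofList _ _).mp ((PySem.List.mem_sorted _ _ _ _).mp ha)
      rcases List.mem_map.mp ha' with ⟨c, hc, hfc⟩
      rcases List.mem_filter.mp hc with ⟨hcl, hne⟩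
      have hle : msu ≤ a := by
        have := PySem.List.min?_isMin hm (y := a) (hfc ▸ List.mem_map_of_mem hcl)
        simpa using this
      have hne' : a ≠ msu := by subst hfc; simpa using hne
      exact lt_of_le_of_ne hle (Ne.symm hne')
    · exact PySem.List.sorted_ofList_pairwise_lt _

-- picking a suite other than the dropped one is unaffected by dropping it
theorem pick_drop (m : Int) (l : List (List (String × String))) (msu su : String) (hne : su ≠ msu) :
    pvPick m (l.filter (fun c => pvGet c "suite" != msu)) su = pvPick m l su := by
  unfold pvPick
  rw [List.filter_filter, List.filter_filter]
  congr 2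
  all_goals
    apply List.filter_congr
    intro c _
    by_cases h : pvGet c "suite" = su
    · simp [h, hne]
    · simp [h]

-- the loop computes `selected ++` the canonical form of `remaining`
theorem selectLoop_eq_canon (m : Int) :
    ∀ n (l : List (List (String × String))), l.length ≤ n →
      ∀ sel, selectLoop m sel l = sel ++ pvCanon m l := by
  intro n
  induction n with
  | zero =>
    intro l hl sel
    have : l = [] := List.length_eq_zero_iff.mp (Nat.le_zero.mp hl)
    subst this
    simp [selectLoop, pvCanon]
  | succ n ih =>
    intro l hl sel
    match l with
    | [] => simp [selectLoop, pvCanon]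
    | r :: rs =>
      rcases hm : PySem.List.min? ((r :: rs).map (fun c => pvGet c "suite")) (fun x => x) with _ | msu
      · exact absurd ((PySem.List.min?_eq_none_iff _ _).mp hm) (by simp)
      · rw [selectLoop]
        simp only [hm, Option.getD_some]
        have hlen : ((r :: rs).filter (fun c => pvGet c "suite" != msu)).length ≤ n := by
          have := pvRestShorter r rs
          rw [hm] at this
          simp only [Option.getD_some] at this
          omega
        rw [ih _ hlen]
        rw [List.append_assoc]
        congr 1
        -- canonical form of r :: rs decomposes as pick msu ++ canonical form of the rest
        conv_rhs => rw [pvCanon, sorted_suites_cons r rs msu hm, List.flatMap_cons]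
        congr 1
        · rw [pvCanon]
          apply List.flatMap_congr
          intro su hsu
          have hsu' := (PySem.Set.mem_ofList _ _).mp ((PySem.List.mem_sorted _ _ _ _).mp hsu)
          rcases List.mem_map.mp hsu' with ⟨c, hc, hfc⟩
          have hne : su ≠ msu := by
            have := (List.mem_filter.mp hc).2
            subst hfc
            simpa using this
          exact pick_drop m (r :: rs) msu su hne

-- ===== VERDICT (by name: the statement is the Claim_ definition above) =====
theorem select_cases_spec : Claim_equal_select_cases := by
  intro cases m _ _
  show select_cases cases m = select_cases_alt cases m
  rw [a_eq_canon, select_cases_alt, selectLoop_eq_canon m cases.length cases le_rfl []]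
  simp
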